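-- pv_equiv track=rewrite | github.com/Anup-repo/DSA-Playground | DynamicProgramming/Striver SDE/partition_count_with_diff_d.py | countPartitionsSpaceOptimized
-- ===== SOURCE A (Python) =====
-- def countPartitionsSpaceOptimized(arr, d):
--     mod = 10 ** 9 + 7
--     n = len(arr)
--     total_sum = sum(arr)
--     if total_sum - d < 0 or (total_sum - d) % 2 != 0:
--         return 0
--     s2 = (total_sum - d) // 2
--
--     dp = [0] * (s2 + 1)
--     if arr[0] == 0:
--         dp[0] = 2
--     else:
--         dp[0] = 1
--
--     if arr[0] != 0 and arr[0] <= s2: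
--         dp[arr[0]] = 1
--
--     for i in range(1, n):
--         temp = [0] * (s2 + 1)
--         for target in range(s2 + 1):
--             # Don't pick current element
--             not_pick = dp[target]
--
--             # Pick current element (if possible)
--             pick = 0
--             if arr[i] <= target:
--                 pick = dp[target - arr[i]]
--
--             temp[target] = (pick + not_pick) % mod
--         dp = temp
--
--     return dp[s2]
-- ===== SOURCE B (Python) =====
-- def countPartitionsSpaceOptimized(arr, d):
--     mod = 10 ** 9 + 7
--     total_sum = sum(arr)
--     if total_sum - d < 0 or (total_sum - d) % 2 != 0:
--         return 0
--     s2 = (total_sum - d) // 2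
--
--     # Top-down memoized recursion instead of A's bottom-up rolling-array loop:
--     # f(i, target) = number of subsets of arr[0..i] summing to target, mod 1e9+7.
--     memo = {}
--
--     def f(i, target):
--         if i == 0:
--             if target == 0:
--                 return 2 if arr[0] == 0 else 1
--             return 1 if target == arr[0] else 0
--         key = (i, target)
--         if key in memo:
--             return memo[key]
--         res = f(i - 1, target)
--         if arr[i] <= target:
--             res += f(i - 1, target - arr[i])
--         res %= mod
--         memo[key] = res
--         return res
--
--     return f(len(arr) - 1, s2)
-- ===== Notes on version B (the rewrite author's own statement) =====
-- stated objective: alternative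
-- what changed: Replaces A's bottom-up rolling-array DP (an explicit loop over i filling a dense temp row for every target 0..s2) by a top-down memoized recursion f(i, target) that starts from f(n-1, s2) and only ever computes the (i, target) states actually reachable from the query, with A's first row encoded as the recursion's base case.
-- outside the precondition, e.g. on countPartitionsSpaceOptimized([-1], -3): A returns 1, B returns 0; on countPartitionsSpaceOptimized([], 0): A raises IndexError, B raises RecursionError; on countPartitionsSpaceOptimized([2, -1], 1): A raises IndexError, B returns 1
import Mathlib
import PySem

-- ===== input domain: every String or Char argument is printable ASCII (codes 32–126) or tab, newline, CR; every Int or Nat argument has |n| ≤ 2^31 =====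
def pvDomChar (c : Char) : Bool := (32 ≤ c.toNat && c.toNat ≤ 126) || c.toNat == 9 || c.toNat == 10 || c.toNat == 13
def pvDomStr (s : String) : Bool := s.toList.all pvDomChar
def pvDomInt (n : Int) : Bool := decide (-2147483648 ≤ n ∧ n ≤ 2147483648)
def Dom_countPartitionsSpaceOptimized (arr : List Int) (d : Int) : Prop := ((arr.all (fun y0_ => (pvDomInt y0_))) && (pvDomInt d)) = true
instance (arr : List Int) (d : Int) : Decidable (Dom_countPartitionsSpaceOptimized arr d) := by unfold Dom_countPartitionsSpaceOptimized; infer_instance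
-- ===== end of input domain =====

-- B replaces A's bottom-up rolling-array DP loop by a top-down memoized recursion f(i, target)
-- started at (n-1, s2), with A's first row as the base case; equal return value on Pre_.

-- ===== PORT A =====
-- inner loop of A: temp = [(pick + not_pick) % mod for target in range(s2 + 1)]
def pvRowA (arr : List Int) (s2 md : Int) (dp : List Int) (i : Int) : List Int :=
  (PySem.List.pyRange 0 (s2 + 1) 1).map (fun target =>
    let not_pick := PySem.List.pyGetD dp target 0
    let ai := PySem.List.pyGetD arr i 0
    let pick := if ai ≤ target then PySem.List.pyGetD dp (target - ai) 0 else 0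
    PySem.Int.mod (pick + not_pick) md)

def countPartitionsSpaceOptimized (arr : List Int) (d : Int) : Int :=
  let md : Int := 10 ^ 9 + 7
  let n : Int := PySem.List.len arr
  let total := arr.sum
  if total - d < 0 ∨ PySem.Int.mod (total - d) 2 ≠ 0 then 0
  else
    let s2 := PySem.Int.floordiv (total - d) 2
    let dp1 : List Int := List.replicate (s2 + 1).toNat 0            -- dp = [0] * (s2 + 1)
    let a0 := PySem.List.pyGetD arr 0 0                               -- arr[0]; in range under Pre_
    let dp2 := if a0 = 0 then PySem.List.pySetD dp1 0 2 else PySem.List.pySetD dp1 0 1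
    let dp3 := if a0 ≠ 0 ∧ a0 ≤ s2 then PySem.List.pySetD dp2 a0 1 else dp2   -- dp[arr[0]] = 1; index nonneg under Pre_
    let dpF := (PySem.List.pyRange 1 n 1).foldl (pvRowA arr s2 md) dp3        -- for i in range(1, n)
    PySem.List.pyGetD dpF s2 0                                        -- return dp[s2]; in range

-- ===== PORT B =====
-- the memoized inner function f(i, target) of Source B; the memo dict is threaded through the
-- recursion (Lean is pure), keyed by (i, target) exactly as in Source B; the recursion descends on i
def pvFB (arr : List Int) (md : Int) : Nat → Int → PySem.Dict (Int × Int) Int → Int × PySem.Dict (Int × Int) Int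
  | 0, target, memo =>                                                -- if i == 0: base row
      (if target = 0 then (if PySem.List.pyGetD arr 0 0 = 0 then 2 else 1)
       else if target = PySem.List.pyGetD arr 0 0 then 1 else 0, memo)
  | i+1, target, memo =>
      match memo.get? ((i : Int) + 1, target) with                    -- if key in memo: return memo[key]
      | some v => (v, memo)
      | none =>
        let p1 := pvFB arr md i target memo                           -- res = f(i - 1, target)
        let ai := PySem.List.pyGetD arr ((i : Int) + 1) 0
        let p2 := if ai ≤ target then                                 -- if arr[i] <= target: res += f(i - 1, target - arr[i])
            let q := pvFB arr md i (target - ai) p1.2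
            (p1.1 + q.1, q.2)
          else p1
        let res := PySem.Int.mod p2.1 md                              -- res %= mod
        (res, p2.2.insert ((i : Int) + 1, target) res)                -- memo[key] = res

def countPartitionsSpaceOptimized_alt (arr : List Int) (d : Int) : Int :=
  let md : Int := 10 ^ 9 + 7
  let total := arr.sum
  if total - d < 0 ∨ PySem.Int.mod (total - d) 2 ≠ 0 then 0
  else
    let s2 := PySem.Int.floordiv (total - d) 2
    (pvFB arr md (arr.length - 1) s2 PySem.Dict.empty).1              -- return f(len(arr) - 1, s2)

-- ===== PRECONDITION & SPEC =====
-- Pre_ restricts inputs that pass the guard to the natural domain of this subset-count DP — a nonempty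
-- array of nonnegative integers; on other guard-passing inputs A raises IndexError (empty array, or a
-- negative element reached in the DP loop) or returns an accidental value via Python negative-index
-- wraparound of dp[arr[0]] (and B's recursion itself raises RecursionError on the empty array).
def Pre_countPartitionsSpaceOptimized (arr : List Int) (d : Int) : Prop :=
  (arr.sum - d < 0 ∨ PySem.Int.mod (arr.sum - d) 2 ≠ 0) ∨ (arr ≠ [] ∧ ∀ x ∈ arr, 0 ≤ x)
instance (arr : List Int) (d : Int) : Decidable (Pre_countPartitionsSpaceOptimized arr d) := by
  unfold Pre_countPartitionsSpaceOptimized; infer_instance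

def pvWitness_countPartitionsSpaceOptimized : List Int × Int := ([1, 2], 1)

def Spec_countPartitionsSpaceOptimized (arr : List Int) (d : Int) (out : Int) : Prop := out = countPartitionsSpaceOptimized_alt arr d
instance (arr : List Int) (d : Int) (out : Int) : Decidable (Spec_countPartitionsSpaceOptimized arr d out) := by unfold Spec_countPartitionsSpaceOptimized; infer_instance

-- ===== CLAIM (what is proved, stated in full; the proofs are below) =====
def Claim_equal_countPartitionsSpaceOptimized : Prop := ∀ (arr : List Int) (d : Int), Dom_countPartitionsSpaceOptimized arr d → Pre_countPartitionsSpaceOptimized arr d → Spec_countPartitionsSpaceOptimized arr d (countPartitionsSpaceOptimized arr d)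

-- ===== LEMMAS AND PROOFS =====

-- the pure value of Source B's f(i, target): the same recursion with the memo erased
def pvG (arr : List Int) (md : Int) : Nat → Int → Int
  | 0, t => if t = 0 then (if PySem.List.pyGetD arr 0 0 = 0 then 2 else 1)
            else if t = PySem.List.pyGetD arr 0 0 then 1 else 0
  | i+1, t =>
      let ai := PySem.List.pyGetD arr ((i : Int) + 1) 0
      PySem.Int.mod (pvG arr md i t + (if ai ≤ t then pvG arr md i (t - ai) else 0)) md

-- memo invariant: every stored value is the pure value at its key
def pvMemoOK (arr : List Int) (md : Int) (memo : PySem.Dict (Int × Int) Int) : Prop :=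
  ∀ p v, memo.get? p = some v → v = pvG arr md p.1.toNat p.2

theorem pvFB_eq (arr : List Int) (md : Int) :
    ∀ (i : Nat) (t : Int) (memo : PySem.Dict (Int × Int) Int), pvMemoOK arr md memo →
      (pvFB arr md i t memo).1 = pvG arr md i t ∧ pvMemoOK arr md (pvFB arr md i t memo).2 := by
  intro i
  induction i with
  | zero => intro t memo h; exact ⟨rfl, h⟩
  | succ i ih =>
    intro t memo h
    simp only [pvFB]
    cases hget : memo.get? ((i : Int) + 1, t) with
    | some v =>
      refine ⟨?_, h⟩
      have := h _ _ hget
      simpa [show ((i : Int) + 1).toNat = i + 1 by omega] using this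
    | none =>
      obtain ⟨h1v, h1m⟩ := ih t memo h
      by_cases hle : PySem.List.pyGetD arr ((i : Int) + 1) 0 ≤ t
      · obtain ⟨h2v, h2m⟩ := ih (t - PySem.List.pyGetD arr ((i : Int) + 1) 0) (pvFB arr md i t memo).2 h1m
        have hval : PySem.Int.mod ((pvFB arr md i t memo).1 +
            (pvFB arr md i (t - PySem.List.pyGetD arr ((i : Int) + 1) 0) (pvFB arr md i t memo).2).1) md
            = pvG arr md (i + 1) t := by
          simp only [pvG, h1v, h2v, if_pos hle]
        simp only [if_pos hle]
        refine ⟨hval, ?_⟩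
        intro p v hp
        rw [PySem.Dict.get?_insert] at hp
        split at hp
        · rename_i hpk
          subst hpk
          simp only [Option.some.injEq] at hp
          subst hp
          rw [hval]
          simp [show ((i : Int) + 1).toNat = i + 1 by omega]
        · exact h2m _ _ hp
      · have hval : PySem.Int.mod (pvFB arr md i t memo).1 md = pvG arr md (i + 1) t := by
          simp only [pvG, h1v, if_neg hle, Int.add_zero]
        simp only [if_neg hle]
        refine ⟨hval, ?_⟩
        intro p v hp
        rw [PySem.Dict.get?_insert] at hp
        split at hp
        · rename_i hpk
          subst hpk
          simp only [Option.some.injEq] at hp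
          subst hp
          rw [hval]
          simp [show ((i : Int) + 1).toNat = i + 1 by omega]
        · exact h1m _ _ hp

theorem pv_rowA_getD (arr : List Int) (s2 md : Int) (dp : List Int) (i : Int) (tn : Nat)
    (h : (tn : Int) < s2 + 1) :
    (pvRowA arr s2 md dp i).getD tn 0 =
      PySem.Int.mod ((if PySem.List.pyGetD arr i 0 ≤ (tn : Int)
          then PySem.List.pyGetD dp ((tn : Int) - PySem.List.pyGetD arr i 0) 0 else 0)
        + PySem.List.pyGetD dp (tn : Int) 0) md := by
  rw [pvRowA, List.getD_eq_getElem?_getD, show s2 + 1 = (((s2+1).toNat : Nat) : Int) by omega,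
    PySem.List.getElem?_map_pyRange_zero _ _ tn (by omega), Option.getD_some]

theorem pv_rowA_length (arr : List Int) (s2 md : Int) (dp : List Int) (i : Int) :
    (pvRowA arr s2 md dp i).length = (s2 + 1).toNat := by
  rw [pvRowA, List.length_map, PySem.List.length_pyRange_one]
  norm_num

-- A's initialised first row dp3, pointwise
theorem pv_dp3 (a0 s2 : Int) (ha0 : 0 ≤ a0) (hs : 0 ≤ s2) :
    (if a0 ≠ 0 ∧ a0 ≤ s2
      then PySem.List.pySetD (if a0 = 0 then PySem.List.pySetD (List.replicate (s2 + 1).toNat (0:Int)) 0 2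
                               else PySem.List.pySetD (List.replicate (s2 + 1).toNat (0:Int)) 0 1) a0 1
      else (if a0 = 0 then PySem.List.pySetD (List.replicate (s2 + 1).toNat (0:Int)) 0 2
            else PySem.List.pySetD (List.replicate (s2 + 1).toNat (0:Int)) 0 1)).length = (s2 + 1).toNat ∧
    ∀ m : Nat, m < (s2 + 1).toNat →
      (if a0 ≠ 0 ∧ a0 ≤ s2
        then PySem.List.pySetD (if a0 = 0 then PySem.List.pySetD (List.replicate (s2 + 1).toNat (0:Int)) 0 2
                                 else PySem.List.pySetD (List.replicate (s2 + 1).toNat (0:Int)) 0 1) a0 1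
        else (if a0 = 0 then PySem.List.pySetD (List.replicate (s2 + 1).toNat (0:Int)) 0 2
              else PySem.List.pySetD (List.replicate (s2 + 1).toNat (0:Int)) 0 1)).getD m 0
        = if m = 0 then (if a0 = 0 then 2 else 1) else if (m : Int) = a0 then 1 else 0 := by
  have h0lt : 0 < (s2 + 1).toNat := by omega
  have hset : ∀ (l : List Int) (j v : Int), 0 ≤ j → ∀ m : Nat,
      (PySem.List.pySetD l j v).getD m 0 = if j.toNat = m ∧ j.toNat < l.length then v else l.getD m 0 := by
    intro l j v hj m
    rw [PySem.List.pySetD_of_nonneg l v hj, List.getD_eq_getElem?_getD, List.getElem?_set]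
    by_cases h1 : j.toNat = m
    · subst h1
      by_cases h2 : j.toNat < l.length
      · rw [if_pos rfl, if_pos h2, Option.getD_some, if_pos ⟨rfl, h2⟩]
      · rw [if_pos rfl, if_neg h2, if_neg (fun hc => h2 hc.2), List.getD_eq_getElem?_getD,
          List.getElem?_eq_none (by omega)]
    · rw [if_neg h1, if_neg (fun hc => h1 hc.1), List.getD_eq_getElem?_getD]
  have hrep : ∀ m : Nat, (List.replicate (s2 + 1).toNat (0:Int)).getD m 0 = 0 := by
    intro m; rw [List.getD_eq_getElem?_getD, List.getElem?_replicate]; split <;> rfl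
  refine ⟨?_, ?_⟩
  · split_ifs <;> simp [PySem.List.length_pySetD]
  · intro m hm
    by_cases hA : a0 = 0
    · rw [if_neg (fun hc => hc.1 hA), if_pos hA, hset _ 0 2 le_rfl m, hrep, List.length_replicate]
      split_ifs <;> omega
    · by_cases hB : a0 ≤ s2
      · rw [if_pos ⟨hA, hB⟩, if_neg hA, hset _ a0 1 ha0 m, hset _ 0 1 le_rfl m, hrep,
          PySem.List.length_pySetD, List.length_replicate]
        split_ifs <;> omega
      · rw [if_neg (fun hc => hB hc.2), if_neg hA, hset _ 0 1 le_rfl m, hrep, List.length_replicate]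
        split_ifs <;> omega

-- ===== VERDICT (by name: the statement is the Claim_ definition above) =====
theorem countPartitionsSpaceOptimized_spec : Claim_equal_countPartitionsSpaceOptimized := by
  intro arr d _ hpre
  unfold Spec_countPartitionsSpaceOptimized
  by_cases hg : arr.sum - d < 0 ∨ PySem.Int.mod (arr.sum - d) 2 ≠ 0
  · simp only [countPartitionsSpaceOptimized, countPartitionsSpaceOptimized_alt, if_pos hg]
  · obtain ⟨hne, hnn⟩ : arr ≠ [] ∧ ∀ x ∈ arr, 0 ≤ x := hpre.resolve_left hg
    push Not at hg
    simp only [countPartitionsSpaceOptimized, countPartitionsSpaceOptimized_alt, if_neg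
      (by push Not; exact hg : ¬ (arr.sum - d < 0 ∨ PySem.Int.mod (arr.sum - d) 2 ≠ 0))]
    set md : Int := 10 ^ 9 + 7 with hmddef
    set s2 : Int := PySem.Int.floordiv (arr.sum - d) 2 with hs2def
    have hs2 : 0 ≤ s2 := by
      rw [hs2def, PySem.Int.floordiv_eq_ediv_of_pos (by norm_num)]
      exact Int.ediv_nonneg (by omega) (by norm_num)
    obtain ⟨a0, rest, rfl⟩ : ∃ a0 rest, arr = a0 :: rest := by
      cases arr with
      | nil => exact absurd rfl hne
      | cons a r => exact ⟨a, r, rfl⟩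
    have ha : PySem.List.pyGetD (a0 :: rest) 0 0 = a0 := PySem.List.pyGetD_zero_cons _ _ _
    rw [ha]
    have ha0 : 0 ≤ a0 := hnn a0 List.mem_cons_self
    -- rewrite A's range-&-index fold into a fold over List.range rest.length
    have hn : PySem.List.len (a0 :: rest) = ((rest.length + 1 : Nat) : Int) := by
      rw [PySem.List.len_eq, List.length_cons]
    rw [hn, PySem.List.pyRange_one,
      show ((rest.length + 1 : Nat) : Int) - 1 = ((rest.length : Nat) : Int) by push_cast; ring,
      Int.toNat_natCast, List.foldl_map]
    obtain ⟨hlen3, hdp3⟩ := pv_dp3 a0 s2 ha0 hs2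
    have hidx : ∀ k : Nat, k < rest.length →
        PySem.List.pyGetD (a0 :: rest) (1 + (k : Int)) 0 = rest.getD k 0 := by
      intro k hk
      rw [show (1 : Int) + (k : Int) = ((k + 1 : Nat) : Int) by push_cast; ring,
        PySem.List.pyGetD_natCast]
      simp
    -- rows after k steps equal pvG level k, pointwise
    have hrows : ∀ k : Nat, k ≤ rest.length →
        ((List.range k).foldl (fun dp (j : Nat) => pvRowA (a0 :: rest) s2 md dp (1 + (j : Int)))
          (if a0 ≠ 0 ∧ a0 ≤ s2
            then PySem.List.pySetD (if a0 = 0 then PySem.List.pySetD (List.replicate (s2 + 1).toNat (0:Int)) 0 2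
                                     else PySem.List.pySetD (List.replicate (s2 + 1).toNat (0:Int)) 0 1) a0 1
            else (if a0 = 0 then PySem.List.pySetD (List.replicate (s2 + 1).toNat (0:Int)) 0 2
                  else PySem.List.pySetD (List.replicate (s2 + 1).toNat (0:Int)) 0 1))).length = (s2 + 1).toNat ∧
        ∀ tn : Nat, tn < (s2 + 1).toNat →
          ((List.range k).foldl (fun dp (j : Nat) => pvRowA (a0 :: rest) s2 md dp (1 + (j : Int)))
            (if a0 ≠ 0 ∧ a0 ≤ s2
              then PySem.List.pySetD (if a0 = 0 then PySem.List.pySetD (List.replicate (s2 + 1).toNat (0:Int)) 0 2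
                                       else PySem.List.pySetD (List.replicate (s2 + 1).toNat (0:Int)) 0 1) a0 1
              else (if a0 = 0 then PySem.List.pySetD (List.replicate (s2 + 1).toNat (0:Int)) 0 2
                    else PySem.List.pySetD (List.replicate (s2 + 1).toNat (0:Int)) 0 1))).getD tn 0
            = pvG (a0 :: rest) md k (tn : Int) := by
      intro k
      induction k with
      | zero =>
        intro _
        rw [List.range_zero, List.foldl_nil]
        refine ⟨hlen3, ?_⟩
        intro tn htn
        rw [hdp3 tn htn]
        simp only [pvG, ha]
        by_cases h0 : tn = 0
        · simp [h0]
        · rw [if_neg h0, if_neg (by omega : ¬ ((tn : Int) = 0))]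
      | succ k ih =>
        intro hk
        obtain ⟨ihlen, ihpt⟩ := ih (by omega)
        rw [List.range_succ, List.foldl_append, List.foldl_cons, List.foldl_nil]
        refine ⟨pv_rowA_length _ _ _ _ _, ?_⟩
        intro tn htn
        have hmem : rest.getD k 0 ∈ rest := by
          rw [List.getD_eq_getElem?_getD, List.getElem?_eq_getElem (by omega)]
          exact List.getElem_mem _
        have hak : 0 ≤ rest.getD k 0 := hnn _ (List.mem_cons_of_mem _ hmem)
        rw [pv_rowA_getD _ _ _ _ _ tn (by omega), hidx k (by omega)]
        simp only [pvG, show (k : Int) + 1 = 1 + (k : Int) by ring, hidx k (by omega)]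
        set ak := rest.getD k 0 with hakdef
        rw [PySem.List.pyGetD_natCast, ihpt tn htn]
        by_cases hle : ak ≤ (tn : Int)
        · rw [if_pos hle, if_pos hle,
            show (tn : Int) - ak = ((((tn : Int) - ak).toNat : Nat) : Int) by omega,
            PySem.List.pyGetD_natCast, ihpt _ (by omega), Int.add_comm]
        · rw [if_neg hle, if_neg hle, Int.add_comm]
    obtain ⟨hlenF, hptF⟩ := hrows rest.length le_rfl
    rw [PySem.List.pyGetD_eq_getElem _ _ hs2 (by rw [hlenF]; omega)]
    have := hptF s2.toNat (by omega)
    rw [List.getD_eq_getElem?_getD, List.getElem?_eq_getElem (by rw [hlenF]; omega)] at this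
    simp only [Option.getD_some] at this
    rw [this, Int.toNat_of_nonneg hs2,
      show (a0 :: rest).length - 1 = rest.length by simp,
      (pvFB_eq (a0 :: rest) md rest.length s2 PySem.Dict.empty
        (fun p v hp => by rw [PySem.Dict.get?_empty] at hp; cases hp)).1]
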